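-- pv_equiv track=rewrite | github.com/Arpad-Schaeffer/QRNG | brouillon/plotgausiienne copy.py | assigner_valeurs_binaires
-- ===== SOURCE A (Python) =====
-- def assigner_valeurs_binaires(values, limites, k):
--     """
--     Assigne des valeurs binaires à chaque valeur en fonction des intervalles définis.
--     """
--     binary_values = []
--     for value in values:
--         for i in range(k):
--             if limites[i] <= value < limites[i + 1]:
--                 binary_values.append(format(i, f'0{k.bit_length() - 1}b'))  # Valeur binaire
--                 break
--     return binary_values
-- ===== SOURCE B (Python) =====
-- def assigner_valeurs_binaires(values, limites, k):
--     """
--     Assigne des valeurs binaires a chaque valeur en fonction des intervalles definis.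
--     Interval-major traversal: sweep the intervals from last to first, recording for
--     each value position the (eventually smallest) matching interval index, then
--     format the recorded indices once at the end.
--     """
--     pairs = list(zip(limites, limites[1:]))[:max(k, 0)]
--     best = [None] * len(values)
--     for i in range(len(pairs) - 1, -1, -1):
--         a, b = pairs[i]
--         best = [i if a <= v < b else m for v, m in zip(values, best)]
--     w = k.bit_length() - 1
--     return [format(m, f'0{w}b') for m in best if m is not None]
-- ===== Notes on version B (the rewrite author's own statement) =====
-- stated objective: alternative
-- what changed: A scans intervals per value with an early break; B inverts the traversal: it sweeps the precomputed interval pairs from last to first, overwriting a per-position best-match index array, and formats the recorded indices once at the end.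
-- crash fix: When k >= 1 and k > len(limites)-1 and some value's scan runs past the last usable pair, A raises IndexError; B skips unmatched values and returns the binary codes of the matched ones. — e.g. on assigner_valeurs_binaires([5], [0], 1): A raises IndexError, B returns []
import Mathlib
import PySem

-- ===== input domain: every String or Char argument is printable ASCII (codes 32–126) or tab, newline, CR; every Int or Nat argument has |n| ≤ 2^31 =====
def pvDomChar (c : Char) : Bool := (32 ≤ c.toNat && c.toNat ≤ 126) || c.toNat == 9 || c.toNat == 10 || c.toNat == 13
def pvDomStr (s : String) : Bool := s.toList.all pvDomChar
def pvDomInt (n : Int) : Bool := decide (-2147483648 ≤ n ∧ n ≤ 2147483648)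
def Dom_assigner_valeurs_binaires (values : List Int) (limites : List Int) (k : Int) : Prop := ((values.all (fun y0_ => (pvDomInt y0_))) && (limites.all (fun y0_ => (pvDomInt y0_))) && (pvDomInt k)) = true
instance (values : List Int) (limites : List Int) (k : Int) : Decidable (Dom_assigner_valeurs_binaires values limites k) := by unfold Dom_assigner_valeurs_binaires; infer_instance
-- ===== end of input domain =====

-- B replaces A's value-major scan (per value, scan intervals with break) by an
-- interval-major sweep (from last interval to first, overwrite per-position best
-- match, then format once); same O(n·k) cost, different traversal (objective: alternative).

-- ===== PORT A =====
-- format(i, f'0{w}b') for the nonnegative i both programs format (shared by both ports)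
def pvFmt (i : Int) (k : Int) : String :=
  PySem.Str.zfill (PySem.Int.toBin i) ((PySem.Int.bitLength k : Int) - 1)

-- 'limites[i] <= value < limites[i+1]' (out-of-range = IndexError in Python; false here, excluded by Pre_)
def pvMatchA (limites : List Int) (v : Int) (i : Int) : Bool :=
  match PySem.List.pyGet? limites i, PySem.List.pyGet? limites (i + 1) with
  | some lo, some hi => decide (lo ≤ v) && decide (v < hi)
  | _, _ => false

def assigner_valeurs_binaires (values : List Int) (limites : List Int) (k : Int) : List String :=
  values.foldl
    (fun acc value =>
      match (PySem.List.pyRange 0 k 1).find? (pvMatchA limites value) with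
      | some i => acc ++ [pvFmt i k]
      | none => acc)
    []

-- ===== PORT B =====
def assigner_valeurs_binaires_alt (values : List Int) (limites : List Int) (k : Int) : List String :=
  let pairs := (limites.zip limites.tail).take (max k 0).toNat
  let best :=
    (PySem.List.pyRange (PySem.List.len pairs - 1) (-1) (-1)).foldl
      (fun best i =>
        let ab := PySem.List.pyGetD pairs i (0, 0)
        (values.zip best).map (fun vm => if ab.1 ≤ vm.1 ∧ vm.1 < ab.2 then some i else vm.2))
      (List.replicate values.length (none : Option Int))
  best.filterMap (fun m => m.map (fun i => pvFmt i k))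

-- ===== PRECONDITION & SPEC =====
-- Pre_ excludes exactly the inputs on which A raises IndexError: k ≥ 1 together with
-- k > len(limites)-1 and some value whose scan runs past the last usable pair.
def Pre_assigner_valeurs_binaires (values : List Int) (limites : List Int) (k : Int) : Prop :=
  k ≤ 0 ∨ k + 1 ≤ (limites.length : Int) ∨
    ∀ v ∈ values,
      (∃ p ∈ limites.zip limites.tail, p.1 ≤ v ∧ v < p.2) ∨
      (k = (limites.length : Int) ∧ v < limites.getD (limites.length - 1) 0)
instance (values : List Int) (limites : List Int) (k : Int) : Decidable (Pre_assigner_valeurs_binaires values limites k) := by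
  unfold Pre_assigner_valeurs_binaires; infer_instance
def pvWitness_assigner_valeurs_binaires : List Int × List Int × Int := ([0, 5], [0, 2, 4, 8], 2)

-- A raises IndexError when some value's interval scan indexes past the end of limites
-- (k ≥ 1, k > len(limites)-1); B simply skips values matched by no existing pair and returns the rest.
def Raises_assigner_valeurs_binaires (values : List Int) (limites : List Int) (k : Int) : Prop :=
  1 ≤ k ∧ (limites.length : Int) < k + 1 ∧
    ∃ v ∈ values,
      (∀ p ∈ limites.zip limites.tail, ¬(p.1 ≤ v ∧ v < p.2)) ∧
      ¬(k = (limites.length : Int) ∧ v < limites.getD (limites.length - 1) 0)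
instance (values : List Int) (limites : List Int) (k : Int) : Decidable (Raises_assigner_valeurs_binaires values limites k) := by
  unfold Raises_assigner_valeurs_binaires; infer_instance
def pvRaiseWitness_assigner_valeurs_binaires : List Int × List Int × Int := ([5], [0], 1)
def pvRaiseWitnessOut_assigner_valeurs_binaires : List String := []

def Spec_assigner_valeurs_binaires (values : List Int) (limites : List Int) (k : Int) (out : List String) : Prop := out = assigner_valeurs_binaires_alt values limites k
instance (values : List Int) (limites : List Int) (k : Int) (out : List String) : Decidable (Spec_assigner_valeurs_binaires values limites k out) := by unfold Spec_assigner_valeurs_binaires; infer_instance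

-- ===== CLAIM (what is proved, stated in full; the proofs are below) =====
def Claim_equal_assigner_valeurs_binaires : Prop := ∀ (values : List Int) (limites : List Int) (k : Int), Dom_assigner_valeurs_binaires values limites k → Pre_assigner_valeurs_binaires values limites k → Spec_assigner_valeurs_binaires values limites k (assigner_valeurs_binaires values limites k)
def Claim_raises_assigner_valeurs_binaires : Prop := (∀ (values : List Int) (limites : List Int) (k : Int), Dom_assigner_valeurs_binaires values limites k → Raises_assigner_valeurs_binaires values limites k → ¬ Pre_assigner_valeurs_binaires values limites k) ∧ (Dom_assigner_valeurs_binaires (pvRaiseWitness_assigner_valeurs_binaires.1) (pvRaiseWitness_assigner_valeurs_binaires.2.1) (pvRaiseWitness_assigner_valeurs_binaires.2.2) ∧ Raises_assigner_valeurs_binaires (pvRaiseWitness_assigner_valeurs_binaires.1) (pvRaiseWitness_assigner_valeurs_binaires.2.1) (pvRaiseWitness_assigner_valeurs_binaires.2.2) ∧ assigner_valeurs_binaires_alt (pvRaiseWitness_assigner_valeurs_binaires.1) (pvRaiseWitness_assigner_valeurs_binaires.2.1) (pvRaiseWitness_assigner_valeurs_binaires.2.2) = pvRaiseWitnessOut_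assigner_valeurs_binaires)

-- ===== LEMMAS AND PROOFS =====

-- the inner-scan predicate on pair j of the truncated pair list
def pvCheck (p : Int × Int) (v : Int) : Bool := decide (p.1 ≤ v) && decide (v < p.2)

theorem pv_zip_map_self {α β γ : Type} (l : List α) (f : α → β) (g : α × β → γ) :
    (l.zip (l.map f)).map g = l.map (fun a => g (a, f a)) := by
  induction l with
  | nil => rfl
  | cons a t ih => simp [ih]

theorem pv_fold (values : List Int) (P : List (Int × Int)) (m : Nat) :
    ∀ (f : Int → Option Int),
    (((List.range m).map (fun j : Nat => (j : Int))).reverse).foldl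
      (fun best i =>
        (values.zip best).map (fun vm =>
          if (PySem.List.pyGetD P i (0, 0)).1 ≤ vm.1 ∧ vm.1 < (PySem.List.pyGetD P i (0, 0)).2
          then some i else vm.2))
      (values.map f)
    = values.map (fun v =>
        (((List.range m).find? (fun j => pvCheck (P.getD j (0, 0)) v)).map
          (fun j : Nat => (j : Int))).or (f v)) := by
  induction m with
  | zero => intro f; simp
  | succ m ih =>
    intro f
    rw [List.range_succ, List.map_append, List.reverse_append]
    simp only [List.map_cons, List.map_nil, List.reverse_cons, List.reverse_nil,
      List.nil_append, List.singleton_append, List.foldl_cons]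
    rw [pv_zip_map_self]
    have hstep :
        (values.map fun a =>
          if (PySem.List.pyGetD P ((m : Nat) : Int) (0, 0)).1 ≤ a ∧
              a < (PySem.List.pyGetD P ((m : Nat) : Int) (0, 0)).2
          then some ((m : Nat) : Int) else f a)
        = values.map (fun v => if pvCheck (P.getD m (0, 0)) v then some ((m : Nat) : Int) else f v) := by
      apply List.map_congr_left; intro v _
      simp [pvCheck, PySem.List.pyGetD_natCast]
    rw [hstep, ih]
    apply List.map_congr_left; intro v _
    rw [List.find?_append]
    cases hf : (List.range m).find? (fun j => pvCheck (P.getD j (0, 0)) v) with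
    | some j => simp [hf]
    | none =>
      simp only [hf, Option.map_none, Option.none_or, List.find?_singleton,
        ← List.getD_eq_getElem?_getD]
      cases hc : pvCheck (P.getD m (0, 0)) v <;> simp [hc]

theorem pv_pred_eq (limites : List Int) (v : Int) (K j : Nat)
    (hj : j < ((limites.zip limites.tail).take K).length) :
    pvCheck (((limites.zip limites.tail).take K).getD j (0, 0)) v
      = pvMatchA limites v ((j : Nat) : Int) := by
  have hz : j < (limites.zip limites.tail).length := by
    rw [List.length_take] at hj; omega
  have hL : j + 1 < limites.length := by
    have h1 : (limites.zip limites.tail).length = min limites.length limites.tail.length :=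
      List.length_zip
    rw [List.length_tail] at h1
    omega
  rw [List.getD_eq_getElem _ _ hj, List.getElem_take, List.getElem_zip]
  unfold pvCheck pvMatchA
  have h1 : PySem.List.pyGet? limites ((j : Nat) : Int) = some (limites[j]'(by omega)) := by
    rw [PySem.List.pyGet?_natCast]
    exact List.getElem?_eq_getElem (by omega)
  have h2 : PySem.List.pyGet? limites (((j : Nat) : Int) + 1) = some (limites[j + 1]'hL) := by
    rw [show ((j : Nat) : Int) + 1 = ((j + 1 : Nat) : Int) by push_cast; ring, PySem.List.pyGet?_natCast]
    exact List.getElem?_eq_getElem hL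
  rw [h1, h2]
  simp [List.getElem_tail]

theorem pv_matchA_false (limites : List Int) (v : Int) (j : Nat)
    (h : limites.length ≤ j + 1) : pvMatchA limites v ((j : Nat) : Int) = false := by
  unfold pvMatchA
  have h2 : PySem.List.pyGet? limites (((j : Nat) : Int) + 1) = none := by
    rw [show ((j : Nat) : Int) + 1 = ((j + 1 : Nat) : Int) by push_cast; ring, PySem.List.pyGet?_natCast]
    exact List.getElem?_eq_none h
  rw [h2]
  cases PySem.List.pyGet? limites ((j : Nat) : Int) <;> rfl

theorem pv_find?_congr {α : Type} (l : List α) (p q : α → Bool)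
    (h : ∀ a ∈ l, p a = q a) : l.find? p = l.find? q := by
  induction l with
  | nil => rfl
  | cons a t ih =>
    simp only [List.find?_cons]
    rw [h a (by simp)]
    cases q a with
    | true => rfl
    | false => exact ih fun a ha => h a (by simp [ha])

theorem pv_find_eq (limites : List Int) (k : Int) (v : Int)
    (h : k ≤ 0 ∨ k + 1 ≤ (limites.length : Int) ∨ k = (limites.length : Int) ∨
      ∃ p ∈ limites.zip limites.tail, p.1 ≤ v ∧ v < p.2) :
    (PySem.List.pyRange 0 k 1).find? (pvMatchA limites v)
      = ((List.range ((limites.zip limites.tail).take (max k 0).toNat).length).find?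
          (fun j => pvCheck (((limites.zip limites.tail).take (max k 0).toNat).getD j (0, 0)) v)).map
          (fun j : Nat => (j : Int)) := by
  set Z := limites.zip limites.tail with hZ
  have hZlen : Z.length = limites.length - 1 := by
    have h1 : Z.length = min limites.length limites.tail.length := List.length_zip
    rw [List.length_tail] at h1
    omega
  by_cases hk : k ≤ 0
  · have hm : (max k 0).toNat = 0 := by omega
    rw [PySem.List.pyRange_one_eq_nil hk, hm]
    simp
  · push_neg at hk
    have hkK : k = ((k.toNat : Nat) : Int) := by omega
    rw [show (max k 0).toNat = k.toNat by omega]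
    set K := k.toNat with hK
    set n := (Z.take K).length with hn
    have hnval : n = min K Z.length := by rw [hn]; exact List.length_take
    rw [hkK, PySem.List.pyRange_zero_natCast, List.find?_map]
    simp only [Function.comp_def]
    have hcongr : ∀ m : Nat, m ≤ n →
        (List.range m).find? (fun j : Nat => pvMatchA limites v ((j : Nat) : Int))
          = (List.range m).find? (fun j => pvCheck ((Z.take K).getD j (0, 0)) v) := by
      intro m hm
      refine pv_find?_congr _ _ _ fun j hjm => ?_
      have hjm' := List.mem_range.mp hjm
      exact (pv_pred_eq limites v K j (by rw [List.length_take, ← hZ]; omega)).symm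
    by_cases hKn : K ≤ Z.length
    · have hnK : n = K := by omega
      rw [hnK] at hcongr ⊢
      exact congrArg _ (hcongr K le_rfl)
    · push_neg at hKn
      have hnZ : n = Z.length := by omega
      have hsplit : List.range K = List.range n ++ List.range' n (K - n) := by
        rw [show K = n + (K - n) by omega, List.range_add]
        simp [List.range'_eq_map_range]
      rw [hsplit, List.find?_append, hcongr n le_rfl]
      rcases h with h | h | h | h
      · omega
      · omega
      · -- k = len(limites): the single extra index n = len-1 probes pyGet? at len → none
        have hKL : K = limites.length := by omega
        have hrest : List.range' n (K - n) = [n] := by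
          rw [show K - n = 1 by omega]
          rfl
        rw [hrest]
        have hfalse : pvMatchA limites v ((n : Nat) : Int) = false :=
          pv_matchA_false limites v n (by omega)
        rw [List.find?_singleton, hfalse]
        simp
      · -- a matching pair exists among the pairs
        obtain ⟨p, hp, hc⟩ := h
        obtain ⟨j, hjZ, hpj⟩ := List.mem_iff_getElem.mp hp
        have hPZ : Z.take K = Z := List.take_of_length_le (by omega)
        have hsome : ((List.range n).find?
            (fun j => pvCheck ((Z.take K).getD j (0, 0)) v)).isSome := by
          rw [List.find?_isSome]
          refine ⟨j, List.mem_range.mpr (by omega), ?_⟩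
          rw [hPZ, List.getD_eq_getElem _ _ (by omega), hpj]
          simp only [pvCheck, Bool.and_eq_true, decide_eq_true_eq]
          exact ⟨hc.1, hc.2⟩
        obtain ⟨j0, hj0⟩ := Option.isSome_iff_exists.mp hsome
        rw [hj0]
        simp


theorem pv_filterMap_flat {α β : Type} (l : List α) (f : α → Option β) :
    (l.flatMap fun a => (f a).toList) = l.filterMap f := by
  induction l with
  | nil => rfl
  | cons a t ih => cases h : f a <;> simp [h, ih]

theorem pv_filterMap_congr {α β : Type} (l : List α) (f g : α → Option β)
    (h : ∀ a ∈ l, f a = g a) : l.filterMap f = l.filterMap g := by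
  induction l with
  | nil => rfl
  | cons a t ih =>
    simp only [List.filterMap_cons, h a (by simp)]
    rw [ih fun a ha => h a (by simp [ha])]

theorem pv_range_rev (n : Nat) :
    PySem.List.pyRange ((n : Int) - 1) (-1) (-1)
      = ((List.range n).map (fun j : Nat => (j : Int))).reverse := by
  rw [PySem.List.pyRange_neg_one_eq_reverse]
  norm_num
  rw [PySem.List.pyRange_zero_natCast]

-- ===== VERDICT =====
-- assigner_valeurs_binaires_spec discharges Claim_equal_assigner_valeurs_binaires;
-- assigner_valeurs_binaires_raises discharges Claim_raises_assigner_valeurs_binaires.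
theorem assigner_valeurs_binaires_spec : Claim_equal_assigner_valeurs_binaires := by
  intro values limites k _ hPre
  unfold Spec_assigner_valeurs_binaires
  -- A side: loop with break+append = filterMap of the first-match option
  unfold assigner_valeurs_binaires
  have hA : (fun (acc : List String) value =>
      match (PySem.List.pyRange 0 k 1).find? (pvMatchA limites value) with
      | some i => acc ++ [pvFmt i k]
      | none => acc)
      = fun acc value => acc ++
          (((PySem.List.pyRange 0 k 1).find? (pvMatchA limites value)).map
            (fun i => pvFmt i k)).toList := by
    funext acc value
    cases h : (PySem.List.pyRange 0 k 1).find? (pvMatchA limites value) <;> simp [h]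
  rw [hA, PySem.List.foldl_append_eq_flatMap, List.nil_append, pv_filterMap_flat]
  -- B side: reversed interval sweep = filterMap of the least-match option
  simp only [assigner_valeurs_binaires_alt, PySem.List.len_eq]
  rw [pv_range_rev, show List.replicate values.length (none : Option Int)
        = values.map (fun _ => none) by simp, pv_fold, List.filterMap_map]
  refine pv_filterMap_congr _ _ _ fun v hv => ?_
  have hcond : k ≤ 0 ∨ k + 1 ≤ (limites.length : Int) ∨ k = (limites.length : Int) ∨
      ∃ p ∈ limites.zip limites.tail, p.1 ≤ v ∧ v < p.2 := by
    rcases hPre with h | h | h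
    · exact Or.inl h
    · exact Or.inr (Or.inl h)
    · rcases h v hv with hm | ⟨hkL, _⟩
      · exact Or.inr (Or.inr (Or.inr hm))
      · exact Or.inr (Or.inr (Or.inl hkL))
  rw [pv_find_eq limites k v hcond]
  simp [Function.comp_def]

theorem assigner_valeurs_binaires_raises : Claim_raises_assigner_valeurs_binaires := by
  unfold Claim_raises_assigner_valeurs_binaires
  constructor
  · rintro values limites k _ ⟨hk1, hlen, v, hv, hnom, hnol⟩ hPre
    rcases hPre with h | h | h
    · omega
    · omega
    · rcases h v hv with ⟨p, hp, hc⟩ | hl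
      · exact hnom p hp hc
      · exact hnol hl
  · refine ⟨by decide, by decide, by decide⟩

-- sanity corollary of the crash-fix claim: the raise witness lies outside Pre_
theorem pvRaiseWitnessExcluded_ok : ¬ Pre_assigner_valeurs_binaires [5] [0] 1 :=
  assigner_valeurs_binaires_raises.1 [5] [0] 1 (by decide) (by decide)
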